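-- pv_equiv track=rewrite | github.com/arda-kara/diffusion-model-for-scene-understanding | scene_understanding/utils/nlp_utils.py | find_matching_object
-- ===== SOURCE A (Python) =====
-- def find_matching_object(text, objects):
--     """
--     Find a matching object from the list of detected objects.
--
--     Args:
--         text (str): Text to match.
--         objects (list): List of object class labels.
--
--     Returns:
--         str: Matching object class label, or None if no match is found.
--     """
--     if not text or not objects:
--         return None
--
--     text = text.lower()
--
--     # Direct match
--     for obj in objects:
--         if text == obj.lower():
--             return obj
--
--     # Check if text contains any of the objects
--     for obj in objects:
--         if obj.lower() in text:
--             return obj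
--
--     # Check if any object contains the text
--     for obj in objects:
--         if text in obj.lower():
--             return obj
--
--     # Check for word overlap
--     text_words = set(text.split())
--     for obj in objects:
--         obj_words = set(obj.lower().split())
--         if text_words.intersection(obj_words):
--             return obj
--
--     return None
-- ===== SOURCE B (Python) =====
-- def find_matching_object(text, objects):
--     """Single pass: rank each object (1 exact, 2 object-in-text, 3 text-in-object,
--     4 word overlap), keep the first object with the lowest rank."""
--     if not text or not objects:
--         return None
--
--     t = text.lower()
--     tw = set(t.split())
--
--     def rank(obj):
--         ol = obj.lower()
--         if t == ol:
--             return 1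
--         if ol in t:
--             return 2
--         if t in ol:
--             return 3
--         if any(w in tw for w in ol.split()):
--             return 4
--         return None
--
--     best = None
--     for obj in objects:
--         r = rank(obj)
--         if r is not None and (best is None or r < best[0]):
--             best = (r, obj)
--     return best[1] if best is not None else None
-- ===== Notes on version B (the rewrite author's own statement) =====
-- stated objective: alternative
-- what changed: Replaced A's four sequential scans of the object list by a single pass that assigns each object a priority rank and keeps the first object achieving the lowest rank (strict-less updates preserve first-match tie-breaking).
import Mathlib
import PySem

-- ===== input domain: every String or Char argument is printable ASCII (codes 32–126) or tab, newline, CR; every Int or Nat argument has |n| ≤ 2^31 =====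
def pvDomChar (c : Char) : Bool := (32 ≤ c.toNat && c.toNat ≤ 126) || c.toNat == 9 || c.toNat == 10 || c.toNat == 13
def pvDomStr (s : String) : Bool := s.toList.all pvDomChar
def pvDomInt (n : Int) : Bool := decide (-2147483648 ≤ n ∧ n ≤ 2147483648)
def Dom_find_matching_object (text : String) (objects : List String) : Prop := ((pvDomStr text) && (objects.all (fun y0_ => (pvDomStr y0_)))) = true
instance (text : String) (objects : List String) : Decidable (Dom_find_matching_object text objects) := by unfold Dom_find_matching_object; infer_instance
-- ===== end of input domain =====

-- B replaces A's four sequential scans of the object list by one pass that keeps the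
-- first object of lowest priority rank (alternative decomposition; same asymptotic cost).

-- ===== PORT A =====
def find_matching_object (text : String) (objects : List String) : Option String :=
  if text == "" || objects.isEmpty then none
  else
    let t := PySem.Str.lower text
    match objects.find? (fun obj => t == PySem.Str.lower obj) with
    | some obj => some obj
    | none =>
      match objects.find? (fun obj => PySem.Str.isIn (PySem.Str.lower obj) t) with
      | some obj => some obj
      | none =>
        match objects.find? (fun obj => PySem.Str.isIn t (PySem.Str.lower obj)) with
        | some obj => some obj
        | none =>
          let tw := PySem.Set.ofList (PySem.Str.split₀ t)
          objects.find? (fun obj =>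
            !(PySem.Set.inter tw (PySem.Set.ofList (PySem.Str.split₀ (PySem.Str.lower obj)))).isEmpty)

-- ===== PORT B =====
-- per-object priority rank: 1 exact, 2 object-in-text, 3 text-in-object, 4 word overlap
def pvRank (t : String) (tw : PySem.Set String) (obj : String) : Option Nat :=
  let ol := PySem.Str.lower obj
  if t == ol then some 1
  else if PySem.Str.isIn ol t then some 2
  else if PySem.Str.isIn t ol then some 3
  else if (PySem.Str.split₀ ol).any (fun w => PySem.Set.contains tw w) then some 4
  else none

-- keep the best (lowest-rank, first-seen) candidate; update only on a strictly smaller rank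
def pvStep (t : String) (tw : PySem.Set String) (best : Option (Nat × String))
    (obj : String) : Option (Nat × String) :=
  match pvRank t tw obj with
  | none => best
  | some r =>
    match best with
    | none => some (r, obj)
    | some (br, bo) => if r < br then some (r, obj) else some (br, bo)

def find_matching_object_alt (text : String) (objects : List String) : Option String :=
  if text == "" || objects.isEmpty then none
  else
    let t := PySem.Str.lower text
    let tw := PySem.Set.ofList (PySem.Str.split₀ t)
    (objects.foldl (pvStep t tw) none).map (·.2)

-- ===== PRECONDITION & SPEC =====
def Spec_find_matching_object (text : String) (objects : List String) (out : Option String) : Prop := out = find_matching_object_alt text objects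
instance (text : String) (objects : List String) (out : Option String) : Decidable (Spec_find_matching_object text objects out) := by unfold Spec_find_matching_object; infer_instance

-- ===== CLAIM (what is proved, stated in full; the proofs are below) =====
def Claim_equal_find_matching_object : Prop := ∀ (text : String) (objects : List String), Dom_find_matching_object text objects → Spec_find_matching_object text objects (find_matching_object text objects)

-- ===== LEMMAS AND PROOFS =====

-- merge two candidates, preferring the left one on equal ranks (strict-less update)
def pvMerge (a b : Option (Nat × String)) : Option (Nat × String) :=
  match a, b with
  | none, b => b
  | some a, none => some a
  | some a, some b => if b.1 < a.1 then some b else some a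

def pvRankOpt (t : String) (tw : PySem.Set String) (obj : String) : Option (Nat × String) :=
  (pvRank t tw obj).map (fun r => (r, obj))

theorem pvStep_eq_merge (t : String) (tw : PySem.Set String) (a : Option (Nat × String))
    (obj : String) : pvStep t tw a obj = pvMerge a (pvRankOpt t tw obj) := by
  unfold pvStep pvMerge pvRankOpt
  rcases pvRank t tw obj with _ | r <;> rcases a with _ | ⟨br, bo⟩ <;> simp

theorem pvMerge_none_right (a : Option (Nat × String)) : pvMerge a none = a := by
  cases a <;> rfl

theorem pvMerge_assoc (a b c : Option (Nat × String)) :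
    pvMerge (pvMerge a b) c = pvMerge a (pvMerge b c) := by
  rcases a with _ | ⟨a1, a2⟩
  · rfl
  rcases b with _ | ⟨b1, b2⟩
  · rfl
  rcases c with _ | ⟨c1, c2⟩
  · rw [pvMerge_none_right, pvMerge_none_right]
  · by_cases h1 : b1 < a1 <;> by_cases h2 : c1 < b1 <;> by_cases h3 : c1 < a1 <;>
      simp [pvMerge, h1, h2, h3] <;> omega

theorem pvFold_eq_merge (t : String) (tw : PySem.Set String) (l : List String)
    (a : Option (Nat × String)) :
    l.foldl (pvStep t tw) a = pvMerge a (l.foldl (pvStep t tw) none) := by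
  induction l generalizing a with
  | nil => cases a <;> rfl
  | cons o l ih =>
    simp only [List.foldl_cons]
    rw [ih (pvStep t tw a o), ih (pvStep t tw none o),
        pvStep_eq_merge t tw a o, pvStep_eq_merge t tw none o, ← pvMerge_assoc]
    rfl

-- cascade characterisation of the one-pass fold
def pvCascade (t : String) (tw : PySem.Set String) (l : List String) : Option (Nat × String) :=
  ((l.find? (fun o => pvRank t tw o == some 1)).map (fun o => (1, o))).or
  (((l.find? (fun o => pvRank t tw o == some 2)).map (fun o => (2, o))).or
  (((l.find? (fun o => pvRank t tw o == some 3)).map (fun o => (3, o))).or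
   ((l.find? (fun o => pvRank t tw o == some 4)).map (fun o => (4, o)))))

theorem pvRank_cases (t : String) (tw : PySem.Set String) (o : String) :
    pvRank t tw o = none ∨ pvRank t tw o = some 1 ∨ pvRank t tw o = some 2 ∨
    pvRank t tw o = some 3 ∨ pvRank t tw o = some 4 := by
  unfold pvRank
  dsimp only
  split_ifs <;> simp

theorem pvFold_eq_cascade (t : String) (tw : PySem.Set String) (l : List String) :
    l.foldl (pvStep t tw) none = pvCascade t tw l := by
  induction l with
  | nil => rfl
  | cons o l ih =>
    have hstep : (o :: l).foldl (pvStep t tw) none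
        = pvMerge (pvRankOpt t tw o) (l.foldl (pvStep t tw) none) := by
      simp only [List.foldl_cons]
      rw [pvFold_eq_merge, pvStep_eq_merge]
      rfl
    rw [hstep, ih]
    rcases pvRank_cases t tw o with h | h | h | h | h <;>
      unfold pvCascade pvRankOpt pvMerge <;> simp [h] <;>
      rcases h1 : l.find? (fun o => pvRank t tw o == some 1) with _ | x1 <;>
      rcases h2 : l.find? (fun o => pvRank t tw o == some 2) with _ | x2 <;>
      rcases h3 : l.find? (fun o => pvRank t tw o == some 3) with _ | x3 <;>
      rcases h4 : l.find? (fun o => pvRank t tw o == some 4) with _ | x4 <;>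
      simp

-- congruence for find? under predicates equal on the list's members
theorem pvFind?_congr {p q : String → Bool} {l : List String}
    (h : ∀ o ∈ l, p o = q o) : l.find? p = l.find? q := by
  induction l with
  | nil => rfl
  | cons o l ih =>
    simp only [List.find?_cons]
    rw [h o (List.mem_cons_self), ih (fun x hx => h x (List.mem_cons_of_mem o hx))]

-- A's word-overlap test (non-empty set intersection) equals B's any-membership test
theorem pvOverlap_eq (t : String) (o : String) :
    (!(PySem.Set.inter (PySem.Set.ofList (PySem.Str.split₀ t))
        (PySem.Set.ofList (PySem.Str.split₀ (PySem.Str.lower o)))).isEmpty)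
      = (PySem.Str.split₀ (PySem.Str.lower o)).any
          (fun w => PySem.Set.contains (PySem.Set.ofList (PySem.Str.split₀ t)) w) := by
  rw [Bool.eq_iff_iff]
  simp [PySem.Set.inter, PySem.Set.contains, List.isEmpty_eq_false_iff,
    List.any_eq_true, PySem.Set.mem_ofList, List.filter_eq_nil_iff]
  exact ⟨fun ⟨x, h1, h2⟩ => ⟨x, h2, h1⟩, fun ⟨x, h1, h2⟩ => ⟨x, h2, h1⟩⟩

-- rank tests unfolded stage by stage
theorem pvRank_beq_one (t : String) (tw : PySem.Set String) (o : String) :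
    (pvRank t tw o == some 1) = (t == PySem.Str.lower o) := by
  unfold pvRank; dsimp only; split_ifs with h1 h2 h3 h4 <;> simp [h1]

theorem pvRank_beq_two (t : String) (tw : PySem.Set String) (o : String)
    (h1 : (t == PySem.Str.lower o) = false) :
    (pvRank t tw o == some 2) = PySem.Str.isIn (PySem.Str.lower o) t := by
  unfold pvRank; dsimp only; split_ifs with g1 g2 g3 g4 <;> simp_all

theorem pvRank_beq_three (t : String) (tw : PySem.Set String) (o : String)
    (h1 : (t == PySem.Str.lower o) = false)
    (h2 : PySem.Str.isIn (PySem.Str.lower o) t = false) :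
    (pvRank t tw o == some 3) = PySem.Str.isIn t (PySem.Str.lower o) := by
  unfold pvRank; dsimp only; split_ifs with g1 g2 g3 g4 <;> simp_all

theorem pvRank_beq_four (t : String) (o : String)
    (h1 : (t == PySem.Str.lower o) = false)
    (h2 : PySem.Str.isIn (PySem.Str.lower o) t = false)
    (h3 : PySem.Str.isIn t (PySem.Str.lower o) = false) :
    (pvRank t (PySem.Set.ofList (PySem.Str.split₀ t)) o == some 4)
      = !(PySem.Set.inter (PySem.Set.ofList (PySem.Str.split₀ t))
            (PySem.Set.ofList (PySem.Str.split₀ (PySem.Str.lower o)))).isEmpty := by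
  rw [pvOverlap_eq]
  unfold pvRank; dsimp only; split_ifs with g1 g2 g3 g4 <;> simp_all

-- ===== VERDICT (by name: the statement is the Claim_ definition above) =====
theorem find_matching_object_spec : Claim_equal_find_matching_object := by
  intro text objects _
  unfold Spec_find_matching_object find_matching_object find_matching_object_alt
  by_cases hg : (text == "" || objects.isEmpty) = true
  · rw [if_pos hg, if_pos hg]
  · rw [if_neg hg, if_neg hg]
    dsimp only
    rw [pvFold_eq_cascade]
    unfold pvCascade
    rw [pvFind?_congr (fun o _ => pvRank_beq_one (PySem.Str.lower text) _ o)]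
    cases h1 : objects.find? (fun obj => PySem.Str.lower text == PySem.Str.lower obj) with
    | some x => simp
    | none =>
      have n1 : ∀ o ∈ objects, (PySem.Str.lower text == PySem.Str.lower o) = false := by
        intro o ho
        have := List.find?_eq_none.mp h1 o ho
        simpa using this
      rw [pvFind?_congr (fun o ho => pvRank_beq_two (PySem.Str.lower text) _ o (n1 o ho))]
      cases h2 : objects.find? (fun obj => PySem.Str.isIn (PySem.Str.lower obj) (PySem.Str.lower text)) with
      | some x => simp
      | none =>
        have n2 : ∀ o ∈ objects, PySem.Str.isIn (PySem.Str.lower o) (PySem.Str.lower text) = false := by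
          intro o ho
          have := List.find?_eq_none.mp h2 o ho
          simpa using this
        rw [pvFind?_congr (fun o ho => pvRank_beq_three (PySem.Str.lower text) _ o (n1 o ho) (n2 o ho))]
        cases h3 : objects.find? (fun obj => PySem.Str.isIn (PySem.Str.lower text) (PySem.Str.lower obj)) with
        | some x => simp
        | none =>
          have n3 : ∀ o ∈ objects, PySem.Str.isIn (PySem.Str.lower text) (PySem.Str.lower o) = false := by
            intro o ho
            have := List.find?_eq_none.mp h3 o ho
            simpa using this
          rw [pvFind?_congr (fun o ho => pvRank_beq_four (PySem.Str.lower text) o (n1 o ho) (n2 o ho) (n3 o ho))]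
          cases h4 : objects.find? (fun obj =>
              !(PySem.Set.inter (PySem.Set.ofList (PySem.Str.split₀ (PySem.Str.lower text)))
                  (PySem.Set.ofList (PySem.Str.split₀ (PySem.Str.lower obj)))).isEmpty) with
          | some x => simp
          | none => simp
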